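-- pv_equiv track=rewrite | github.com/Porosyatka/test_clone | lec9/lec9_4.py | left_bound
-- ===== SOURCE A (Python) =====
-- def left_bound(A, key):
--     left = -1
--     right = len(A)
--     while right - left > 1:
--         middle = (left + right) // 2
--         if A[middle] < key:
--             left = middle
--         else:
--             right = middle
--     return left
-- ===== SOURCE B (Python) =====
-- def left_bound(A, key):
--     # Two-phase: build the binary-search decision tree for bounds (-1, len(A))
--     # (its shape depends only on len(A)), then walk it with the key comparisons.
--     def build(left, right):
--         if right - left <= 1:
--             return left                       # leaf: the candidate answer
--         middle = (left + right) // 2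
--         return (middle, build(middle, right), build(left, middle))
--     node = build(-1, len(A))
--     while isinstance(node, tuple):
--         middle, lt, ge = node
--         node = lt if A[middle] < key else ge
--     return node
-- ===== Notes on version B (the rewrite author's own statement) =====
-- stated objective: alternative
-- what changed: B replaces A's single iterative (left,right) while-loop by two phases with an explicit data structure: it first builds the key-independent binary-search decision tree for bounds (-1, len(A)) by recursion, then walks that tree with the A[middle] < key comparisons; it trades O(n) tree-building work for the structural split.
import Mathlib
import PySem

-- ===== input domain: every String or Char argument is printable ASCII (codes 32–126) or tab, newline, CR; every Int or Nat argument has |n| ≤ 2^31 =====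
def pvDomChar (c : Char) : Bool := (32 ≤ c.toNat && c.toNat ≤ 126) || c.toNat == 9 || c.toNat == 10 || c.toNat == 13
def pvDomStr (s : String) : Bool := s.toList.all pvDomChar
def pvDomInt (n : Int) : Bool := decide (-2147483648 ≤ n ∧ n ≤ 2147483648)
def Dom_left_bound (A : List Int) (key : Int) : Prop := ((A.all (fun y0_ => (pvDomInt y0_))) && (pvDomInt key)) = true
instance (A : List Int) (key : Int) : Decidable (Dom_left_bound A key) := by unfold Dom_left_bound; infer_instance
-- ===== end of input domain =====

-- B replaces A's while-loop by an explicit decision-tree data structure: build the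
-- key-independent search tree for (-1, len(A)), then walk it with the comparisons.

-- ===== PORT A =====
-- while right - left > 1: middle = (left+right)//2; narrow.  (A[middle] is always in
-- range when the loop body runs, so the pyGetD default is never used.)
def leftBoundLoop (A : List Int) (key : Int) (left right : Int) : Int :=
  if _h : right - left > 1 then
    let middle := PySem.Int.floordiv (left + right) 2
    if PySem.List.pyGetD A middle 0 < key then
      leftBoundLoop A key middle right
    else
      leftBoundLoop A key left middle
  else left
termination_by (right - left).toNat
decreasing_by
  all_goals
    simp only [middle, PySem.Int.floordiv_eq_ediv_of_pos (a := left + right) (by omega : (0:Int) < 2)] at *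
    omega

def left_bound (A : List Int) (key : Int) : Int :=
  leftBoundLoop A key (-1) (PySem.List.len A)

-- ===== PORT B =====
-- the decision tree: a leaf carries the candidate answer, a node carries the probed
-- index and the two subtrees ("A[middle] < key" branch first).
inductive BSTree where
  | leaf : Int → BSTree
  | node : Int → BSTree → BSTree → BSTree

-- phase 1: build(left, right) — depends only on the bounds, never on the key.
def buildTree (left right : Int) : BSTree :=
  if _h : right - left ≤ 1 then .leaf left
  else
    let middle := PySem.Int.floordiv (left + right) 2
    .node middle (buildTree middle right) (buildTree left middle)
termination_by (right - left).toNat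
decreasing_by
  all_goals
    simp only [PySem.Int.floordiv_eq_ediv_of_pos (a := left + right) (by omega : (0:Int) < 2)] at *
    omega

-- phase 2: walk the tree with the key comparisons.
def walkTree (A : List Int) (key : Int) : BSTree → Int
  | .leaf a => a
  | .node middle lt ge =>
      if PySem.List.pyGetD A middle 0 < key then walkTree A key lt else walkTree A key ge

def left_bound_alt (A : List Int) (key : Int) : Int :=
  walkTree A key (buildTree (-1) (PySem.List.len A))

-- ===== PRECONDITION & SPEC =====
def Spec_left_bound (A : List Int) (key : Int) (out : Int) : Prop := out = left_bound_alt A key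
instance (A : List Int) (key : Int) (out : Int) : Decidable (Spec_left_bound A key out) := by unfold Spec_left_bound; infer_instance

-- ===== CLAIM (what is proved, stated in full; the proofs are below) =====
def Claim_equal_left_bound : Prop := ∀ (A : List Int) (key : Int), Dom_left_bound A key → Spec_left_bound A key (left_bound A key)

-- ===== LEMMAS AND PROOFS =====

-- walking the tree built for (l, r) is exactly running A's loop from (l, r)
theorem walk_build_eq_loop (A : List Int) (key : Int) :
    ∀ n (l r : Int), (r - l).toNat ≤ n →
      walkTree A key (buildTree l r) = leftBoundLoop A key l r := by
  intro n
  induction n with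
  | zero =>
      intro l r h
      rw [buildTree, leftBoundLoop]
      rw [dif_pos (by omega : r - l ≤ 1), dif_neg (by omega : ¬ r - l > 1)]
      rfl
  | succ n ih =>
      intro l r h
      rw [buildTree, leftBoundLoop]
      by_cases hw : r - l > 1
      · have hfd : PySem.Int.floordiv (l + r) 2 = (l + r) / 2 :=
          PySem.Int.floordiv_eq_ediv_of_pos (by omega)
        rw [dif_neg (by omega : ¬ r - l ≤ 1), dif_pos hw]
        simp only [walkTree]
        by_cases hc : PySem.List.pyGetD A (PySem.Int.floordiv (l + r) 2) 0 < key
        · rw [if_pos hc, if_pos hc]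
          exact ih _ r (by omega)
        · rw [if_neg hc, if_neg hc]
          exact ih l _ (by omega)
      · rw [dif_pos (by omega : r - l ≤ 1), dif_neg hw]
        rfl

-- ===== VERDICT (by name: the statement is the Claim_ definition above) =====
theorem left_bound_spec : Claim_equal_left_bound := by
  intro A key _
  show left_bound A key = left_bound_alt A key
  unfold left_bound left_bound_alt
  exact (walk_build_eq_loop A key (PySem.List.len A - (-1)).toNat (-1) (PySem.List.len A) le_rfl).symm
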